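-- pv_equiv track=rewrite | github.com/DevBob-Study/Javascript-Test-Study | 1주차/PGS_모의고사/seoheun.py | solution
-- ===== SOURCE A (Python) =====
-- def solution(answers):
--     answer = { 1: 0, 2: 0, 3: 0 }
--
--     student1 = [1, 2, 3, 4, 5] # 5
--     student2 = [2, 1, 2, 3, 2, 4, 2, 5] # 8
--     student3 = [3, 3, 1, 1, 2, 2, 4, 4, 5, 5] # 10
--
--     for i in range(len(answers)):
--         if answers[i] == student1[i % 5]:
--             answer[1] += 1
--         if answers[i] == student2[i % 8]:
--             answer[2] += 1
--         if answers[i] == student3[i % 10]: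
--             answer[3] += 1
--
--     result = answer[1]
--     keyList = []
--
--     for key in range(1, 4):
--         if result < answer[key]:
--             result = answer[key]
--             keyList = []
--             keyList.append(key)
--         elif result == answer[key]:
--             keyList.append(key)
--
--     keyList.sort()
--
--     return keyList
-- ===== SOURCE B (Python) =====
-- def solution(answers):
--     hist = {}
--     for i, a in enumerate(answers):
--         key = (i % 40, a)
--         hist[key] = hist.get(key, 0) + 1
--     patterns = [[1, 2, 3, 4, 5], [2, 1, 2, 3, 2, 4, 2, 5], [3, 3, 1, 1, 2, 2, 4, 4, 5, 5]]
--     rows = [p * (40 // len(p)) for p in patterns]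
--     scores = [sum(hist.get((j, row[j]), 0) for j in range(40)) for row in rows]
--     best = max(scores)
--     return [i + 1 for i, s in enumerate(scores) if s == best]
-- ===== Notes on version B (the rewrite author's own statement) =====
-- stated objective: alternative
-- what changed: B replaces A's per-answer comparison against the three cyclic patterns with a one-pass histogram keyed by (position mod 40, answer) — 40 being the lcm of the pattern lengths — from which each student's score is read as a fixed sum of 40 table lookups, and selects winners by compute-max-then-filter instead of A's incremental max-tracking loop.
import Mathlib
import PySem

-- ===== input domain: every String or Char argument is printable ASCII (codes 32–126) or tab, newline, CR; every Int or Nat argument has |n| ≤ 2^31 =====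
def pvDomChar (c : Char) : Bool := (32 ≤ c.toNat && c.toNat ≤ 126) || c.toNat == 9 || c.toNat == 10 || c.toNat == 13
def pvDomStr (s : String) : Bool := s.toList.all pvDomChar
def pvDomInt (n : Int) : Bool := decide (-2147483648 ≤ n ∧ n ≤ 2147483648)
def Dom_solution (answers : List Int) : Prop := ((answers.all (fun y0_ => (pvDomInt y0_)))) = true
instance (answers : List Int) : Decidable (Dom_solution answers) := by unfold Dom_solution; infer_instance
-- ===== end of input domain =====

-- B builds, in one pass, a histogram keyed by (position mod 40, answer) — 40 = lcm of the
-- three pattern lengths — and reads each student's score off that table as a fixed sum of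
-- 40 lookups, never comparing answers with patterns elementwise; winners by max-then-filter.
-- Objective: alternative (a table-lookup scorer instead of A's interleaved comparison loop).

-- ===== PORT A =====
def solution (answers : List Int) : List Int :=
  let answer : PySem.Dict Int Int := PySem.Dict.ofList [(1, 0), (2, 0), (3, 0)]
  let student1 : List Int := [1, 2, 3, 4, 5]
  let student2 : List Int := [2, 1, 2, 3, 2, 4, 2, 5]
  let student3 : List Int := [3, 3, 1, 1, 2, 2, 4, 4, 5, 5]
  let answer := (PySem.List.pyRange 0 (PySem.List.len answers) 1).foldl (fun d i =>
    let d := if PySem.List.pyGetD answers i 0 = PySem.List.pyGetD student1 (PySem.Int.mod i 5) 0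
             then d.insert 1 (d.getD 1 0 + 1) else d
    let d := if PySem.List.pyGetD answers i 0 = PySem.List.pyGetD student2 (PySem.Int.mod i 8) 0
             then d.insert 2 (d.getD 2 0 + 1) else d
    if PySem.List.pyGetD answers i 0 = PySem.List.pyGetD student3 (PySem.Int.mod i 10) 0
    then d.insert 3 (d.getD 3 0 + 1) else d) answer
  let st := (PySem.List.pyRange 1 4 1).foldl (fun (st : Int × List Int) key =>
      if st.1 < answer.getD key 0 then (answer.getD key 0, [key])
      else if st.1 = answer.getD key 0 then (st.1, st.2 ++ [key]) else st)
      (answer.getD 1 0, [])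
  PySem.List.sorted st.2 (fun x => x) false

-- ===== PORT B =====
def solution_alt (answers : List Int) : List Int :=
  let hist : PySem.Dict (Int × Int) Int := PySem.Dict.ofList []
  let hist := (PySem.List.enumerate answers 0).foldl (fun d p =>
    let key : Int × Int := (PySem.Int.mod p.1 40, p.2)
    d.insert key (d.getD key 0 + 1)) hist
  let patterns : List (List Int) :=
    [[1, 2, 3, 4, 5], [2, 1, 2, 3, 2, 4, 2, 5], [3, 3, 1, 1, 2, 2, 4, 4, 5, 5]]
  let rows : List (List Int) := patterns.map (fun p => List.flatten (List.replicate (40 / p.length) p))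
  let scores : List Int := rows.map (fun row =>
    (PySem.List.pyRange 0 40 1).foldl (fun s j => s + hist.getD (j, PySem.List.pyGetD row j 0) 0) 0)
  let best : Int := (PySem.List.max? scores (fun x => x)).getD 0
  ((PySem.List.enumerate scores 0).filter (fun p => p.2 == best)).map (fun p => p.1 + 1)

-- ===== PRECONDITION & SPEC =====
def Spec_solution (answers : List Int) (out : List Int) : Prop := out = solution_alt answers
instance (answers : List Int) (out : List Int) : Decidable (Spec_solution answers out) := by unfold Spec_solution; infer_instance

-- ===== CLAIM (what is proved, stated in full; the proofs are below) =====
def Claim_equal_solution : Prop := ∀ (answers : List Int), Dom_solution answers → Spec_solution answers (solution answers)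

-- ===== LEMMAS AND PROOFS =====

/-- Proof-only name for the body of A's counting loop. -/
def stepA (d : PySem.Dict Int Int) (p : Int × Int) : PySem.Dict Int Int :=
  let d := if p.2 = PySem.List.pyGetD [1, 2, 3, 4, 5] (PySem.Int.mod p.1 5) 0
           then d.insert 1 (d.getD 1 0 + 1) else d
  let d := if p.2 = PySem.List.pyGetD [2, 1, 2, 3, 2, 4, 2, 5] (PySem.Int.mod p.1 8) 0
           then d.insert 2 (d.getD 2 0 + 1) else d
  if p.2 = PySem.List.pyGetD [3, 3, 1, 1, 2, 2, 4, 4, 5, 5] (PySem.Int.mod p.1 10) 0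
  then d.insert 3 (d.getD 3 0 + 1) else d

/-- Proof-only name for A's selection loop over the keys 1..3. -/
def selA (ans : PySem.Dict Int Int) : Int × List Int :=
  (PySem.List.pyRange 1 4 1).foldl (fun (st : Int × List Int) key =>
      if st.1 < ans.getD key 0 then (ans.getD key 0, [key])
      else if st.1 = ans.getD key 0 then (st.1, st.2 ++ [key]) else st)
    (ans.getD 1 0, [])

/-- Number of answers matching a cyclically repeated pattern, starting at position `i`. -/
def cnt (pat : List Int) (i : Int) : List Int → Int
  | [] => 0
  | a :: xs =>
      (if a = PySem.List.pyGetD pat (PySem.Int.mod i (pat.length : Int)) 0 then 1 else 0)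
        + cnt pat (i + 1) xs

lemma loopA (xs : List Int) : ∀ (s x y z : Int),
    (PySem.List.enumerate xs s).foldl stepA (PySem.Dict.mk [(1, x), (2, y), (3, z)])
    = PySem.Dict.mk [(1, x + cnt [1, 2, 3, 4, 5] s xs),
                     (2, y + cnt [2, 1, 2, 3, 2, 4, 2, 5] s xs),
                     (3, z + cnt [3, 3, 1, 1, 2, 2, 4, 4, 5, 5] s xs)] := by
  induction xs with
  | nil => intro s x y z; simp [PySem.List.enumerate_nil, cnt]
  | cons a t ih =>
    intro s x y z
    rw [PySem.List.enumerate_cons, List.foldl_cons]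
    have hstep : stepA (PySem.Dict.mk [(1, x), (2, y), (3, z)]) (s, a)
      = PySem.Dict.mk
          [(1, x + if a = PySem.List.pyGetD [1, 2, 3, 4, 5] (PySem.Int.mod s 5) 0 then 1 else 0),
           (2, y + if a = PySem.List.pyGetD [2, 1, 2, 3, 2, 4, 2, 5] (PySem.Int.mod s 8) 0 then 1 else 0),
           (3, z + if a = PySem.List.pyGetD [3, 3, 1, 1, 2, 2, 4, 4, 5, 5] (PySem.Int.mod s 10) 0 then 1 else 0)] := by
      unfold stepA
      split_ifs <;> simp only [add_zero] <;> rfl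
    rw [hstep, ih]
    simp only [cnt]
    norm_num
    refine ⟨by ring, by ring, by ring⟩

lemma select_eq (c1 c2 c3 : Int) :
    PySem.List.sorted ((selA (PySem.Dict.mk [(1, c1), (2, c2), (3, c3)])).2) (fun x => x) false
    = ((PySem.List.enumerate [c1, c2, c3] 0).filter
        (fun p => p.2 == (PySem.List.max? [c1, c2, c3] (fun x => x)).getD 0)).map
        (fun p => p.1 + 1) := by
  have g1 : (PySem.Dict.mk [(1, c1), (2, c2), (3, c3)] : PySem.Dict Int Int).getD 1 0 = c1 := rfl
  have g2 : (PySem.Dict.mk [(1, c1), (2, c2), (3, c3)] : PySem.Dict Int Int).getD 2 0 = c2 := rfl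
  have g3 : (PySem.Dict.mk [(1, c1), (2, c2), (3, c3)] : PySem.Dict Int Int).getD 3 0 = c3 := rfl
  unfold selA
  rw [show PySem.List.pyRange 1 4 1 = [1, 2, 3] from rfl]
  simp only [List.foldl_cons, List.foldl_nil, g1, g2, g3]
  rw [PySem.List.max?_id_cons c1 [c2, c3]]
  simp only [List.foldl_cons, List.foldl_nil, Option.getD_some,
    PySem.List.enumerate_cons, PySem.List.enumerate_nil, List.filter_cons, List.filter_nil,
    beq_iff_eq]
  split_ifs <;> first | rfl | omega

/-- The insert-with-getD+1 loop builds exact multiplicities. -/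
lemma hist_getD (lst : List (Int × Int)) : ∀ (d : PySem.Dict (Int × Int) Int) (k : Int × Int),
    ((lst.foldl (fun d x => d.insert x (d.getD x 0 + 1)) d).getD k 0)
      = d.getD k 0 + (lst.count k : Int) := by
  induction lst with
  | nil => intro d k; simp
  | cons x t ih =>
    intro d k
    rw [List.foldl_cons, ih, PySem.Dict.getD_insert, List.count_cons]
    by_cases h : k = x
    · simp [h]; ring
    · have h2 : ¬ x = k := fun he => h he.symm
      simp [h, h2]

lemma sum_ind_zero (g : Int → Int) (m a : Int) :
    ∀ (l : List Int), m ∉ l →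
    (l.map (fun j => if ((j, g j) : Int × Int) = (m, a) then (1 : Int) else 0)).sum = 0 := by
  intro l
  induction l with
  | nil => intro _; simp
  | cons j t ih =>
    intro h
    simp only [List.mem_cons, not_or] at h
    have hj : ((j, g j) : Int × Int) ≠ (m, a) := fun he => h.1 (congrArg Prod.fst he).symm
    rw [List.map_cons, List.sum_cons, if_neg hj, zero_add, ih h.2]

lemma sum_ind (g : Int → Int) (m a : Int) :
    ∀ (l : List Int), l.Nodup → m ∈ l →
    (l.map (fun j => if ((j, g j) : Int × Int) = (m, a) then (1 : Int) else 0)).sum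
      = if a = g m then 1 else 0 := by
  intro l
  induction l with
  | nil => intro _ h; simp at h
  | cons j t ih =>
    intro hnd hm
    rcases List.mem_cons.mp hm with he | ht
    · subst he
      have hnin : m ∉ t := (List.nodup_cons.mp hnd).1
      rw [List.map_cons, List.sum_cons, sum_ind_zero g m a t hnin, add_zero]
      by_cases h : a = g m
      · rw [if_pos (by rw [h] : ((m, g m) : Int × Int) = (m, a)), if_pos h]
      · rw [if_neg (fun he => h (congrArg Prod.snd he).symm), if_neg h]
    · have hne : j ≠ m := fun hh => (List.nodup_cons.mp hnd).1 (by rw [hh]; exact ht)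
      have hj : ((j, g j) : Int × Int) ≠ (m, a) := fun he => hne (congrArg Prod.fst he)
      rw [List.map_cons, List.sum_cons, if_neg hj, zero_add]
      exact ih (List.nodup_cons.mp hnd).2 ht

/-- Summing per-key multiplicities over a nodup key list counts the matching pairs. -/
lemma sum_count (g : Int → Int) (l : List Int) (hnd : l.Nodup) :
    ∀ (M : List (Int × Int)), (∀ p ∈ M, p.1 ∈ l) →
    (l.map (fun j => (M.count ((j, g j)) : Int))).sum
      = (M.countP (fun p => p.2 == g p.1) : Int) := by
  intro M
  induction M with
  | nil => intro _; simp
  | cons p T ih =>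
    intro hmem
    have hcnt : ∀ j : Int, (((p :: T).count ((j, g j)) : Nat) : Int)
        = (T.count ((j, g j)) : Int) + (if ((j, g j) : Int × Int) = (p.1, p.2) then (1 : Int) else 0) := by
      intro j
      rw [List.count_cons]
      by_cases h : ((j, g j) : Int × Int) = p
      · simp [h]
      · have h2 : ¬ p = ((j, g j) : Int × Int) := fun he => h he.symm
        simp [h, h2]
    have hmap : (l.map (fun j => ((p :: T).count ((j, g j)) : Int)))
        = l.map (fun j => (T.count ((j, g j)) : Int)
            + (if ((j, g j) : Int × Int) = (p.1, p.2) then (1 : Int) else 0)) := by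
      exact List.map_congr_left (fun j _ => hcnt j)
    rw [hmap, PySem.List.sum_map_add_int, ih (fun q hq => hmem q (List.mem_cons_of_mem p hq)),
        sum_ind g p.1 p.2 l hnd (hmem p List.mem_cons_self), List.countP_cons]
    by_cases h : p.2 = g p.1
    · simp [h]
    · simp [h]

/-- B's histogram: one pass over the enumerated answers keyed by (index mod 40, value). -/
def histB (xs : List Int) : PySem.Dict (Int × Int) Int :=
  (PySem.List.enumerate xs 0).foldl (fun d p =>
    d.insert (PySem.Int.mod p.1 40, p.2)
      (d.getD (PySem.Int.mod p.1 40, p.2) 0 + 1)) (PySem.Dict.ofList [])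

lemma countP_enum (pat row : List Int) (hL : pat.length ∣ 40)
    (hrow : ∀ j : Nat, j < 40 → row.getD j 0 = pat.getD (j % pat.length) 0) :
    ∀ (xs : List Int) (n : Nat),
    (((PySem.List.enumerate xs ((n : Nat) : Int)).countP
        (fun q => q.2 == PySem.List.pyGetD row (PySem.Int.mod q.1 40) 0)) : Int)
      = cnt pat ((n : Nat) : Int) xs := by
  intro xs
  induction xs with
  | nil => intro n; simp [PySem.List.enumerate_nil, cnt]
  | cons a t ih =>
    intro n
    have hmod : PySem.Int.mod ((n : Nat) : Int) 40 = (((n % 40 : Nat)) : Int) :=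
      PySem.Int.mod_natCast n 40
    have hmodL : PySem.Int.mod ((n : Nat) : Int) (pat.length : Int) = (((n % pat.length : Nat)) : Int) :=
      PySem.Int.mod_natCast n pat.length
    have hval : PySem.List.pyGetD row (PySem.Int.mod ((n : Nat) : Int) 40) 0
        = PySem.List.pyGetD pat (PySem.Int.mod ((n : Nat) : Int) (pat.length : Int)) 0 := by
      rw [hmod, hmodL, PySem.List.pyGetD_natCast, PySem.List.pyGetD_natCast,
          hrow (n % 40) (Nat.mod_lt n (by omega)), Nat.mod_mod_of_dvd n hL]
    have hsucc : ((n : Nat) : Int) + 1 = (((n + 1 : Nat)) : Int) := by push_cast; ring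
    have hcnt : cnt pat ((n : Nat) : Int) (a :: t)
        = (if a = PySem.List.pyGetD pat (PySem.Int.mod ((n : Nat) : Int) (pat.length : Int)) 0
           then (1 : Int) else 0) + cnt pat (((n : Nat) : Int) + 1) t := rfl
    rw [PySem.List.enumerate_cons, List.countP_cons, hcnt, hsucc, ← ih (n + 1)]
    simp only [hval, beq_iff_eq]
    split_ifs with h <;> push_cast <;> ring

lemma range40_lit : PySem.List.pyRange 0 40 1
    = [0, 1, 2, 3, 4, 5, 6, 7, 8, 9, 10, 11, 12, 13, 14, 15, 16, 17, 18, 19, 20, 21, 22, 23,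
       24, 25, 26, 27, 28, 29, 30, 31, 32, 33, 34, 35, 36, 37, 38, 39] := by decide

/-- B's score of one pattern, read off the histogram, equals the cyclic match count. -/
lemma score_eq (pat row : List Int) (hL : pat.length ∣ 40)
    (hrow : ∀ j : Nat, j < 40 → row.getD j 0 = pat.getD (j % pat.length) 0) (xs : List Int) :
    (PySem.List.pyRange 0 40 1).foldl
        (fun s j => s + (histB xs).getD (j, PySem.List.pyGetD row j 0) 0) 0
      = cnt pat 0 xs := by
  have hmapfold : histB xs
      = ((PySem.List.enumerate xs 0).map (fun p => (PySem.Int.mod p.1 40, p.2))).foldl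
          (fun d x => d.insert x (d.getD x 0 + 1)) (PySem.Dict.ofList []) := by
    unfold histB; rw [List.foldl_map]
  have hget : ∀ k : Int × Int, (histB xs).getD k 0
      = (((PySem.List.enumerate xs 0).map (fun p => (PySem.Int.mod p.1 40, p.2))).count k : Int) := by
    intro k
    rw [hmapfold, hist_getD]
    norm_num
    rfl
  rw [PySem.List.foldl_add]
  have hmapc : (PySem.List.pyRange 0 40 1).map
      (fun j => (histB xs).getD (j, PySem.List.pyGetD row j 0) 0)
      = (PySem.List.pyRange 0 40 1).map (fun j =>
          ((((PySem.List.enumerate xs 0).map (fun p => (PySem.Int.mod p.1 40, p.2))).count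
            ((j, PySem.List.pyGetD row j 0)) : Nat) : Int)) :=
    List.map_congr_left (fun j _ => hget (j, PySem.List.pyGetD row j 0))
  rw [hmapc, sum_count (fun j => PySem.List.pyGetD row j 0) (PySem.List.pyRange 0 40 1)
      (by rw [range40_lit]; decide)
      ((PySem.List.enumerate xs 0).map (fun p => (PySem.Int.mod p.1 40, p.2)))
      (by
        intro p hp
        rcases List.mem_map.mp hp with ⟨q, _, rfl⟩
        rw [PySem.List.mem_pyRange_iff_of_pos (by norm_num : (0:Int) < 1)]
        rw [PySem.Int.mod_eq_emod_of_pos (by norm_num : (0:Int) < 40)]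
        refine ⟨Int.emod_nonneg q.1 (by norm_num), Int.emod_lt_of_pos q.1 (by norm_num), one_dvd _⟩)]
  rw [List.countP_map]
  have := countP_enum pat row hL hrow xs 0
  simpa using this

-- ===== VERDICT (by name: the statement is the Claim_ definition above) =====
theorem solution_spec : Claim_equal_solution := by
  intro answers _
  unfold Spec_solution
  have hb : (PySem.List.pyRange 0 (PySem.List.len answers) 1).foldl
      (fun d j => stepA d (j, PySem.List.pyGetD answers j 0))
      (PySem.Dict.mk [(1, 0), (2, 0), (3, 0)])
      = (PySem.List.enumerate answers 0).foldl stepA (PySem.Dict.mk [(1, 0), (2, 0), (3, 0)]) := by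
    rw [PySem.List.enumerate_eq_map_pyRange (d := 0), List.foldl_map]
  have hA : solution answers = PySem.List.sorted
      ((selA ((PySem.List.enumerate answers 0).foldl stepA
          (PySem.Dict.mk [(1, 0), (2, 0), (3, 0)]))).2) (fun x => x) false := by
    rw [← hb]; rfl
  have hBexp : solution_alt answers
      = (let scores : List Int :=
          [(PySem.List.pyRange 0 40 1).foldl (fun s j => s + (histB answers).getD
              (j, PySem.List.pyGetD (List.flatten (List.replicate (40 / 5) ([1,2,3,4,5] : List Int))) j 0) 0) 0,
           (PySem.List.pyRange 0 40 1).foldl (fun s j => s + (histB answers).getD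
              (j, PySem.List.pyGetD (List.flatten (List.replicate (40 / 8) ([2,1,2,3,2,4,2,5] : List Int))) j 0) 0) 0,
           (PySem.List.pyRange 0 40 1).foldl (fun s j => s + (histB answers).getD
              (j, PySem.List.pyGetD (List.flatten (List.replicate (40 / 10) ([3,3,1,1,2,2,4,4,5,5] : List Int))) j 0) 0) 0]
         ((PySem.List.enumerate scores 0).filter
            (fun p => p.2 == (PySem.List.max? scores (fun x => x)).getD 0)).map (fun p => p.1 + 1)) := rfl
  have hs1 := score_eq [1,2,3,4,5] (List.flatten (List.replicate (40 / 5) ([1,2,3,4,5] : List Int)))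
      (by decide) (by decide) answers
  have hs2 := score_eq [2,1,2,3,2,4,2,5] (List.flatten (List.replicate (40 / 8) ([2,1,2,3,2,4,2,5] : List Int)))
      (by decide) (by decide) answers
  have hs3 := score_eq [3,3,1,1,2,2,4,4,5,5] (List.flatten (List.replicate (40 / 10) ([3,3,1,1,2,2,4,4,5,5] : List Int)))
      (by decide) (by decide) answers
  rw [hA, loopA, hBexp]
  simp only [hs1, hs2, hs3]
  simpa using select_eq (cnt [1, 2, 3, 4, 5] 0 answers)
    (cnt [2, 1, 2, 3, 2, 4, 2, 5] 0 answers)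
    (cnt [3, 3, 1, 1, 2, 2, 4, 4, 5, 5] 0 answers)
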